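-- pv_equiv track=rewrite | github.com/Beginner090902/aniworld_scraper_fork | src/logic/language.py | restructure_dict
-- ===== SOURCE A (Python) =====
-- def restructure_dict(given_dict):
--     new_dict = {}
--     already_seen = set()
--     for key, value in given_dict.items():
--         new_dict[value] = set([element.strip() for element in key.split(',')])
--     return_dict = {}
--     for key, values in new_dict.items():
--         for value in values:
--             if value in already_seen and value in return_dict:
--                 del return_dict[value]
--                 continue
--             if value not in already_seen and value not in return_dict:
--                 return_dict[value] = key
--                 already_seen.add(value)
--     return return_dict
-- ===== SOURCE B (Python) =====
-- def restructure_dict(given_dict):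
--     new_dict = {}
--     for key, value in given_dict.items():
--         new_dict[value] = set(element.strip() for element in key.split(','))
--     counts = {}
--     for values in new_dict.values():
--         for element in values:
--             counts[element] = counts.get(element, 0) + 1
--     return {element: key
--             for key, values in new_dict.items()
--             for element in values
--             if counts[element] == 1}
-- ===== Notes on version B (the rewrite author's own statement) =====
-- stated objective: simpler
-- what changed: A's single pass with already_seen bookkeeping and add-then-delete mutation of return_dict is replaced by a count-then-filter decomposition: build a frequency table of all elements across new_dict's sets, then emit element -> value only for elements whose total count is 1.
import Mathlib
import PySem

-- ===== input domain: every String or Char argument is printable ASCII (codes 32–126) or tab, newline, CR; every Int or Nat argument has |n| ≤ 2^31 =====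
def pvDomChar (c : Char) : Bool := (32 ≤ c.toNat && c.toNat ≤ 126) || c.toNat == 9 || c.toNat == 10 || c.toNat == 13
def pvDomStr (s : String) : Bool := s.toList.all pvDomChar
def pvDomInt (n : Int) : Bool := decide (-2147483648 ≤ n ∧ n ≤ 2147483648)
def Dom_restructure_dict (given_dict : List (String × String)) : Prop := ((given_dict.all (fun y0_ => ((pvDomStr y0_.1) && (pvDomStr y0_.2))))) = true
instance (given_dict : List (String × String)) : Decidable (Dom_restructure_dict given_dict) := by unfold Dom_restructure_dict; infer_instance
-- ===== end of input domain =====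

-- B replaces A's add-then-delete bookkeeping (already_seen + deletions from return_dict) with a
-- count-then-filter decomposition (objective: simpler). Python iterates each set in this code in
-- an unspecified hash order; both ports iterate sets in first-insertion order — the returned
-- dict's CONTENT does not depend on that order, and dict outputs are compared ignoring order.

-- ===== PORT A =====
-- new_dict[value] = set(element.strip() for element in key.split(','))  (shared shape of both Pythons)
def pvNewDict (given_dict : List (String × String)) : PySem.Dict String (PySem.Set String) :=
  given_dict.foldl
    (fun d kv =>
      d.insert kv.2 (PySem.Set.ofList (((PySem.Str.split? kv.1 ",").getD []).map PySem.Str.strip)))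
    PySem.Dict.empty

-- the body of A's nested loop: state = (already_seen, return_dict)
def pvStepA (key : String) (st : PySem.Set String × PySem.Dict String String) (v : String) :
    PySem.Set String × PySem.Dict String String :=
  if st.1.contains v && st.2.contains v then (st.1, st.2.erase v)
  else if !st.1.contains v && !st.2.contains v then (PySem.Set.add st.1 v, st.2.insert v key)
  else st

def restructure_dict (given_dict : List (String × String)) : List (String × String) :=
  let new_dict := pvNewDict given_dict
  let final :=
    new_dict.items.foldl
      (fun st kvs => kvs.2.foldl (pvStepA kvs.1) st)
      (PySem.Set.empty, PySem.Dict.empty)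
  final.2.items

-- ===== PORT B =====
def restructure_dict_alt (given_dict : List (String × String)) : List (String × String) :=
  let new_dict := pvNewDict given_dict
  let counts : PySem.Dict String Int :=
    new_dict.values.foldl
      (fun c vs => vs.foldl (fun c v => c.insert v (c.getD v 0 + 1)) c)
      PySem.Dict.empty
  new_dict.items.flatMap
    (fun kvs => (kvs.2.filter (fun v => counts.getD v 0 == 1)).map (fun v => (v, kvs.1)))

-- ===== PRECONDITION & SPEC =====
def Spec_restructure_dict (given_dict : List (String × String)) (out : List (String × String)) : Prop := out = restructure_dict_alt given_dict
instance (given_dict : List (String × String)) (out : List (String × String)) : Decidable (Spec_restructure_dict given_dict out) := by unfold Spec_restructure_dict; infer_instance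

-- ===== CLAIM (what is proved, stated in full; the proofs are below) =====
def Claim_equal_restructure_dict : Prop := ∀ (given_dict : List (String × String)), Dom_restructure_dict given_dict → Spec_restructure_dict given_dict (restructure_dict given_dict)

-- ===== LEMMAS AND PROOFS =====

-- the flattened stream of (element, key) occurrences of A's nested loop
def pvOccs (items : List (String × PySem.Set String)) : List (String × String) :=
  items.flatMap (fun kvs => kvs.2.map (fun v => (v, kvs.1)))

-- A's loop state after processing a prefix p of the occurrence stream:
-- already_seen = elements seen so far, return_dict = occurrences whose element count so far is 1
def pvSeenOf (p : List (String × String)) : PySem.Set String :=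
  PySem.Set.ofList (p.map Prod.fst)
def pvRetOf (p : List (String × String)) : PySem.Dict String String :=
  PySem.Dict.mk (p.filter (fun q => (p.map Prod.fst).count q.1 == 1))

theorem pvRet_contains (p : List (String × String)) (v : String) :
    (pvRetOf p).contains v = (decide (v ∈ p.map Prod.fst) && ((p.map Prod.fst).count v == 1)) := by
  simp only [pvRetOf, PySem.Dict.contains]
  rcases h : ((p.map Prod.fst).count v == 1) with _ | _
  · simp only [Bool.and_false]
    rw [List.any_eq_false]
    rintro ⟨a, b⟩ hab
    simp only [List.mem_filter] at hab
    simp only [beq_iff_eq]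
    rintro rfl
    rw [hab.2] at h; simp at h
  · simp only [Bool.and_true]
    by_cases hm : v ∈ p.map Prod.fst
    · simp only [hm, decide_true]
      rw [List.any_eq_true]
      obtain ⟨r, hr, hr1⟩ := List.mem_map.mp hm
      exact ⟨r, List.mem_filter.mpr ⟨hr, by rw [hr1, h]⟩, by simp [hr1]⟩
    · simp only [hm, decide_false]
      rw [List.any_eq_false]
      rintro ⟨a, b⟩ hab
      simp only [List.mem_filter] at hab
      simp only [beq_iff_eq]
      rintro rfl
      exact hm (List.mem_map.mpr ⟨(a, b), hab.1, rfl⟩)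

theorem pvSeen_contains (p : List (String × String)) (v : String) :
    (pvSeenOf p).contains v = decide (v ∈ p.map Prod.fst) := by
  by_cases hm : v ∈ p.map Prod.fst
  · simp only [hm, decide_true]
    exact (PySem.Set.contains_iff _ _).mpr ((PySem.Set.mem_ofList _ _).mpr hm)
  · simp only [hm, decide_false]
    rcases h : (pvSeenOf p).contains v with _ | _
    · rfl
    · exact absurd ((PySem.Set.mem_ofList _ _).mp ((PySem.Set.contains_iff _ _).mp h)) hm

theorem pvStep_snoc (p : List (String × String)) (q : String × String) :
    pvStepA q.2 (pvSeenOf p, pvRetOf p) q.1 = (pvSeenOf (p ++ [q]), pvRetOf (p ++ [q])) := by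
  obtain ⟨v, k⟩ := q
  have hmap : (p ++ [(v, k)]).map Prod.fst = p.map Prod.fst ++ [v] := by simp
  have hcv : (p.map Prod.fst ++ [v]).count v = (p.map Prod.fst).count v + 1 := by
    simp
  have hca : ∀ a : String, a ≠ v → (p.map Prod.fst ++ [v]).count a = (p.map Prod.fst).count a := by
    intro a ha; simp [List.count_append, Ne.symm ha]
  by_cases hm : v ∈ p.map Prod.fst
  · have hs : (pvSeenOf p).contains v = true := by rw [pvSeen_contains]; simp [hm]
    have hseen : pvSeenOf (p ++ [(v, k)]) = pvSeenOf p := by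
      simp only [pvSeenOf, hmap, PySem.Set.ofList_append_singleton,
        PySem.Set.add_of_mem ((PySem.Set.mem_ofList _ _).mpr hm)]
    by_cases h1 : (p.map Prod.fst).count v = 1
    · -- count-so-far 1: A deletes v from return_dict
      have hr : (pvRetOf p).contains v = true := by rw [pvRet_contains]; simp [hm, h1]
      simp only [pvStepA, hs, hr, Bool.and_self, if_true, hseen, Prod.mk.injEq, true_and]
      apply PySem.Dict.ext
      simp only [pvRetOf, PySem.Dict.erase, hmap]
      rw [List.filter_filter, List.filter_append]
      have hq : ((p.map Prod.fst ++ [v]).count v == 1) = false := by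
        simp [hcv, h1]
      simp only [List.filter_cons, List.filter_nil, hq, Bool.false_eq_true, if_false,
        List.append_nil]
      apply List.filter_congr
      rintro ⟨a, b⟩ hab
      by_cases hav : a = v
      · subst hav
        simp [hcv, h1]
      · simp [hca a hav, hav]
    · -- count-so-far ≥ 2: no-op
      have h2 : 1 ≤ (p.map Prod.fst).count v := List.one_le_count_iff.mpr hm
      have hr : (pvRetOf p).contains v = false := by
        rw [pvRet_contains]; simp [h1]
      simp only [pvStepA, hs, hr, Bool.and_false, Bool.not_true, Bool.false_and,
        Bool.false_eq_true, if_false, hseen, Prod.mk.injEq, true_and]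
      apply PySem.Dict.ext
      simp only [pvRetOf, hmap]
      rw [List.filter_append]
      have hq : ((p.map Prod.fst ++ [v]).count v == 1) = false := by
        rw [hcv]; simp only [beq_eq_false_iff_ne]; omega
      simp only [List.filter_cons, List.filter_nil, hq, Bool.false_eq_true, if_false,
        List.append_nil]
      symm
      apply List.filter_congr
      rintro ⟨a, b⟩ hab
      by_cases hav : a = v
      · subst hav
        have e1 : ((p.map Prod.fst ++ [a]).count a == 1) = false := by
          rw [hcv]; simp only [beq_eq_false_iff_ne]; omega
        have e2 : ((p.map Prod.fst).count a == 1) = false := by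
          simp only [beq_eq_false_iff_ne]; omega
        rw [e1, e2]
      · rw [hca a hav]
  · -- fresh element: A inserts
    have h0 : (p.map Prod.fst).count v = 0 := List.count_eq_zero.mpr hm
    have hs : (pvSeenOf p).contains v = false := by rw [pvSeen_contains]; simp [hm]
    have hr : (pvRetOf p).contains v = false := by rw [pvRet_contains]; simp [hm]
    simp only [pvStepA, hs, hr, Bool.and_self, Bool.false_eq_true, if_false, Bool.not_false,
      if_true, Prod.mk.injEq]
    refine ⟨?_, ?_⟩
    · simp only [pvSeenOf, hmap, PySem.Set.ofList_append_singleton]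
    · apply PySem.Dict.ext
      rw [PySem.Dict.items_insert_of_not_contains _ _ hr]
      simp only [pvRetOf, hmap]
      rw [List.filter_append]
      have hq : ((p.map Prod.fst ++ [v]).count v == 1) = true := by
        rw [hcv, h0]; decide
      simp only [List.filter_cons, List.filter_nil, hq, if_true]
      congr 1
      apply List.filter_congr
      rintro ⟨a, b⟩ hab
      have hav : a ≠ v := by
        rintro rfl
        exact hm (List.mem_map.mpr ⟨(a, b), hab, rfl⟩)
      rw [hca a hav]

theorem pvInvariant (l p : List (String × String)) :
    l.foldl (fun st q => pvStepA q.2 st q.1) (pvSeenOf p, pvRetOf p)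
      = (pvSeenOf (p ++ l), pvRetOf (p ++ l)) := by
  induction l generalizing p with
  | nil => simp
  | cons q t ih =>
      rw [List.foldl_cons, pvStep_snoc, ih (p ++ [q]), List.append_assoc]
      rfl

theorem pvA_flat (items : List (String × PySem.Set String)) (st : PySem.Set String × PySem.Dict String String) :
    items.foldl (fun st kvs => kvs.2.foldl (pvStepA kvs.1) st) st
      = (pvOccs items).foldl (fun st q => pvStepA q.2 st q.1) st := by
  induction items generalizing st with
  | nil => rfl
  | cons h t ih =>
      simp only [List.foldl_cons, pvOccs, List.flatMap_cons, List.foldl_append, ih]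
      congr 1
      rw [List.foldl_map]

theorem pvOccs_fst (items : List (String × PySem.Set String)) :
    (pvOccs items).map Prod.fst = items.flatMap (fun kvs => kvs.2) := by
  simp [pvOccs, List.map_flatMap, Function.comp_def]

theorem pvCountsAux (gs : List (String × PySem.Set String)) (c : PySem.Dict String Int) (v : String) :
    ((gs.map Prod.snd).foldl
        (fun c vs => vs.foldl (fun c v => c.insert v (c.getD v 0 + 1)) c) c).getD v 0
      = c.getD v 0 + ((gs.flatMap (fun kvs => kvs.2)).count v : Int) := by
  induction gs generalizing c with
  | nil => simp
  | cons g t ih =>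
      rw [List.map_cons, List.foldl_cons, ih, PySem.Dict.getD_foldl_insert_add_one,
        List.flatMap_cons, List.count_append]
      push_cast
      ring

theorem pvFlatFilter (f : String → Bool) (items : List (String × PySem.Set String)) :
    items.flatMap (fun kvs => (kvs.2.filter f).map (fun v => (v, kvs.1)))
      = (pvOccs items).filter (fun q => f q.1) := by
  induction items with
  | nil => rfl
  | cons g t ih =>
      rw [List.flatMap_cons, ih]
      simp only [pvOccs, List.flatMap_cons, List.filter_append, List.filter_map,
        Function.comp_def]

-- ===== VERDICT (by name: the statement is the Claim_ definition above) =====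
theorem restructure_dict_spec : Claim_equal_restructure_dict := by
  intro given_dict _
  unfold Spec_restructure_dict restructure_dict restructure_dict_alt
  dsimp only
  rw [pvA_flat]
  have hinit : ((PySem.Set.empty : PySem.Set String), (PySem.Dict.empty : PySem.Dict String String))
      = (pvSeenOf [], pvRetOf []) := rfl
  rw [hinit, pvInvariant, List.nil_append]
  rw [pvFlatFilter]
  simp only [pvRetOf]
  apply List.filter_congr
  intro q _
  have hv : (pvNewDict given_dict).values = (pvNewDict given_dict).items.map Prod.snd := rfl
  rw [hv, pvCountsAux, pvOccs_fst]
  simp only [PySem.Dict.getD_empty, zero_add]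
  by_cases hc : ((pvNewDict given_dict).items.flatMap (fun kvs => kvs.2)).count q.1 = 1
  · simp [hc]
  · have h1 : ((((pvNewDict given_dict).items.flatMap (fun kvs => kvs.2)).count q.1 : Int) == 1) = false := by
      simp only [beq_eq_false_iff_ne]
      intro h; exact hc (by exact_mod_cast h)
    have h2 : ((((pvNewDict given_dict).items.flatMap (fun kvs => kvs.2)).count q.1) == 1) = false := by
      simp [hc]
    rw [h1, h2]
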